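-- pv_equiv track=rewrite | github.com/jparep/python-code-competitions | balanced_bracket_sequence/balanced_bracket_sequence.py | isConvertibleData
-- ===== SOURCE A (Python) =====
-- def isConvertibleData(dataset):
--     result = []
--
--     for s in dataset:
--         # Check the counts of '(' and ')'
--         open_count = s.count('(')
--         close_count = s.count(')')
--
--         # If the counts of '(' and ')' differ by more than 1, it's not possible to balance it in 1 move
--         if abs(open_count - close_count) > 1:
--             result.append(0)
--             continue
--
--         # Use a balance counter to simulate the bracket sequence
--         balance = 0
--         min_balance = 0
--
--         for char in s:
--             if char == '(':
--                 balance += 1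
--             else:
--                 balance -= 1
--             # Track the minimum balance during the traversal
--             min_balance = min(min_balance, balance)
--
--         # If min_balance >= -1 and final balance is 0, it's convertible
--         if min_balance >= -1 and balance == 0:
--             result.append(1)
--         else:
--             result.append(0)
--
--     return result
-- ===== SOURCE B (Python) =====
-- def isConvertibleData(dataset):
--     return [_check(s) for s in dataset]
--
--
-- def _check(s):
--     # The counts of the two bracket kinds must not differ by more than 1.
--     if abs(s.count('(') - s.count(')')) > 1:
--         return 0
--     # Stack-based cancellation: every non-'(' character closes the most recent
--     # still-open '(' if there is one; otherwise it is recorded (normalised to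
--     # ')').  The irreducible residue is then ')'*k + '('*m, and the string is
--     # convertible in at most one move exactly when the residue is '' or ')('.
--     stack = []
--     for c in s:
--         if c != '(' and stack and stack[-1] == '(':
--             stack.pop()
--         else:
--             stack.append('(' if c == '(' else ')')
--     return 1 if stack in ([], [')', '(']) else 0
-- ===== Notes on version B (the rewrite author's own statement) =====
-- stated objective: alternative
-- what changed: Replaced A's running-balance/running-minimum scan by stack-based bracket cancellation: each non-'(' character pops the most recent still-open '(' (otherwise it is pushed, normalised to ')'), and the verdict checks whether the irreducible residue is '' or ')('.
import Mathlib
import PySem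

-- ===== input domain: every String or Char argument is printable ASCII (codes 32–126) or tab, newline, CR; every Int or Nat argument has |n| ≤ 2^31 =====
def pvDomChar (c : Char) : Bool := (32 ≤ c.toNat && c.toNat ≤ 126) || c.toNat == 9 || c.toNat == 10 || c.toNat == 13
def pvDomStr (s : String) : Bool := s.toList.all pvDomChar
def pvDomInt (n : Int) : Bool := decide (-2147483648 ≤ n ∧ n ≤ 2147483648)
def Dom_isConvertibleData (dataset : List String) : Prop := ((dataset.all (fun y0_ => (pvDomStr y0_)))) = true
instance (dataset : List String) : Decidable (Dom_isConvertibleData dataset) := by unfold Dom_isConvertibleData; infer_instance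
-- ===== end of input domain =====

-- B replaces A's running-balance / running-minimum scan by stack-based bracket
-- cancellation (each non-'(' closes the most recent open '(' if any; the verdict
-- checks whether the irreducible residue is '' or ')('); objective: alternative
-- algorithm, same cost.

-- ===== PORT A =====
-- the per-string body of A's loop (count check, then the balance/min_balance scan)
def pvJudgeA (s : String) : Int :=
  let open_count : Int := PySem.Str.count s "("
  let close_count : Int := PySem.Str.count s ")"
  if |open_count - close_count| > 1 then 0
  else
    let bm := s.toList.foldl
      (fun (bm : Int × Int) (c : Char) =>
        let b := if c = '(' then bm.1 + 1 else bm.1 - 1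
        (b, min bm.2 b)) (0, 0)
    if bm.2 ≥ -1 ∧ bm.1 = 0 then 1 else 0

def isConvertibleData (dataset : List String) : List Int :=
  dataset.foldl (fun result s => result ++ [pvJudgeA s]) []

-- ===== PORT B =====
-- one step of Source B's stack loop; 'stack and stack[-1] == '('' is the guarded
-- last-element test, exact as st ≠ [] ∧ st.getLast? = some '('; stack.pop() = dropLast
def pvStep (st : List Char) (c : Char) : List Char :=
  if c ≠ '(' ∧ st ≠ [] ∧ st.getLast? = some '(' then st.dropLast
  else st ++ [if c = '(' then '(' else ')']

def pvCheck (s : String) : Int :=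
  if |(PySem.Str.count s "(" : Int) - (PySem.Str.count s ")" : Int)| > 1 then 0
  else
    let st := s.toList.foldl pvStep []
    if st = [] ∨ st = [')', '('] then 1 else 0

def isConvertibleData_alt (dataset : List String) : List Int :=
  dataset.map pvCheck

-- ===== PRECONDITION & SPEC =====
def Spec_isConvertibleData (dataset : List String) (out : List Int) : Prop := out = isConvertibleData_alt dataset
instance (dataset : List String) (out : List Int) : Decidable (Spec_isConvertibleData dataset out) := by unfold Spec_isConvertibleData; infer_instance

-- ===== CLAIM (what is proved, stated in full; the proofs are below) =====
def Claim_equal_isConvertibleData : Prop := ∀ (dataset : List String), Dom_isConvertibleData dataset → Spec_isConvertibleData dataset (isConvertibleData dataset)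

-- ===== LEMMAS AND PROOFS =====

-- A's per-string scan, named for the invariant proofs
def pvAFold (cs : List Char) (b m : Int) : Int × Int :=
  cs.foldl
    (fun (bm : Int × Int) (c : Char) =>
      let b := if c = '(' then bm.1 + 1 else bm.1 - 1
      (b, min bm.2 b)) (b, m)

theorem pvGetLast_rep_close (k : Nat) : (List.replicate k ')').getLast? ≠ some '(' := by
  cases k with
  | zero => simp
  | succ k => rw [List.replicate_succ']; simp

-- invariant: the stack is always ')'*k ++ '('*o with k = -min_balance, o = balance - min_balance
theorem pvStack_eq (cs : List Char) (b m : Int) (hm0 : m ≤ 0) (hmb : m ≤ b) :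
    cs.foldl pvStep (List.replicate (-m).toNat ')' ++ List.replicate (b - m).toNat '(')
      = List.replicate (-(pvAFold cs b m).2).toNat ')'
          ++ List.replicate ((pvAFold cs b m).1 - (pvAFold cs b m).2).toNat '('
    ∧ (pvAFold cs b m).2 ≤ 0 ∧ (pvAFold cs b m).2 ≤ (pvAFold cs b m).1 := by
  induction cs generalizing b m with
  | nil => exact ⟨rfl, hm0, hmb⟩
  | cons c cs' ih =>
    simp only [pvAFold, List.foldl_cons] at *
    by_cases hc : c = '('
    · -- push '('
      have hstep : pvStep (List.replicate (-m).toNat ')' ++ List.replicate (b - m).toNat '(') c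
          = List.replicate (-m).toNat ')' ++ List.replicate ((b + 1) - m).toNat '(' := by
        unfold pvStep
        rw [if_neg (by simp [hc])]
        have : ((b + 1) - m).toNat = (b - m).toNat + 1 := by omega
        rw [this, List.replicate_succ' (n := (b - m).toNat)]
        simp [hc]
      rw [hstep]
      have hmin : min m (b + 1) = m := min_eq_left (by omega)
      simpa [hc, hmin] using ih (b + 1) m hm0 (by omega)
    · by_cases ho : m < b
      · -- pop the top '('
        have hrep : List.replicate (b - m).toNat '(' = List.replicate ((b - 1) - m).toNat '(' ++ ['('] := by
          have : (b - m).toNat = ((b - 1) - m).toNat + 1 := by omega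
          rw [this, List.replicate_succ' (n := ((b - 1) - m).toNat)]
        have hstep : pvStep (List.replicate (-m).toNat ')' ++ List.replicate (b - m).toNat '(') c
            = List.replicate (-m).toNat ')' ++ List.replicate ((b - 1) - m).toNat '(' := by
          unfold pvStep
          rw [if_pos]
          · rw [hrep, ← List.append_assoc, List.dropLast_concat]
          · refine ⟨hc, by simp [hrep], ?_⟩
            rw [hrep, ← List.append_assoc]
            simp
        rw [hstep]
        have hmin : min m (b - 1) = m := min_eq_left (by omega)
        simpa [hc, hmin] using ih (b - 1) m hm0 (by omega)
      · -- b = m : stack is all ')', push another ')'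
        have hbm : b = m := le_antisymm (by omega) hmb
        have hstep : pvStep (List.replicate (-m).toNat ')' ++ List.replicate (b - m).toNat '(') c
            = List.replicate (-(m - 1)).toNat ')' ++ List.replicate ((b - 1) - (m - 1)).toNat '(' := by
          unfold pvStep
          have h0 : (b - m).toNat = 0 := by omega
          rw [if_neg]
          · have : (-(m - 1)).toNat = (-m).toNat + 1 := by omega
            rw [this, List.replicate_succ' (n := (-m).toNat)]
            have h1 : ((b - 1) - (m - 1)).toNat = 0 := by omega
            simp [h0, hc]
          · rintro ⟨-, -, hlast⟩
            rw [h0] at hlast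
            simp only [List.replicate_zero, List.append_nil] at hlast
            exact pvGetLast_rep_close _ hlast
        rw [hstep]
        have hmin : min m (b - 1) = b - 1 := by omega
        have := ih (b - 1) (m - 1) (by omega) (by omega)
        rw [hbm] at *
        simpa [hc, hmin] using this

-- residue shape vs. the two accepted residues
theorem pvRep_empty (k o : Nat) :
    (List.replicate k ')' ++ List.replicate o '(' = ([] : List Char)) ↔ k = 0 ∧ o = 0 := by
  simp [List.append_eq_nil_iff, List.replicate_eq_nil_iff]

theorem pvRep_pair (k o : Nat) :
    (List.replicate k ')' ++ List.replicate o '(' = [')', '(']) ↔ k = 1 ∧ o = 1 := by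
  constructor
  · intro h
    match k, o with
    | 0, o =>
      simp only [List.replicate_zero, List.nil_append] at h
      have := congrArg (List.count '(') h
      simp at this
      have h2 := congrArg (List.count ')') h
      simp [List.count_replicate] at h2
    | k + 1, o =>
      rw [List.replicate_succ] at h
      simp only [List.cons_append, List.cons.injEq] at h
      match k, o with
      | 0, o =>
        simp only [List.replicate_zero, List.nil_append] at h
        match o with
        | 0 => simp at h
        | 1 => exact ⟨rfl, rfl⟩
        | o + 2 => rw [List.replicate_succ, List.replicate_succ] at h; simp at h
      | k + 1, o => rw [List.replicate_succ] at h; simp at h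
  · rintro ⟨rfl, rfl⟩
    rfl

theorem pvJudge_eq (s : String) : pvJudgeA s = pvCheck s := by
  unfold pvJudgeA pvCheck
  by_cases hcnt : |(PySem.Str.count s "(" : Int) - (PySem.Str.count s ")" : Int)| > 1
  · rw [if_pos hcnt, if_pos hcnt]
  · rw [if_neg hcnt, if_neg hcnt]
    obtain ⟨hst, hm0, hmb⟩ := pvStack_eq s.toList 0 0 le_rfl le_rfl
    simp only [show ((-(0:Int)).toNat = 0) from rfl, show (((0:Int) - 0).toNat = 0) from rfl,
      List.replicate_zero, List.nil_append] at hst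
    show (if (pvAFold s.toList 0 0).2 ≥ -1 ∧ (pvAFold s.toList 0 0).1 = 0 then (1:Int) else 0)
       = (if s.toList.foldl pvStep [] = [] ∨ s.toList.foldl pvStep [] = [')', '('] then (1:Int) else 0)
    rw [hst]
    simp only [pvRep_empty, pvRep_pair]
    by_cases h1 : (pvAFold s.toList 0 0).2 ≥ -1 ∧ (pvAFold s.toList 0 0).1 = 0
    · rw [if_pos h1, if_pos]
      omega
    · rw [if_neg h1, if_neg]
      omega

-- ===== VERDICT (by name: the statement is the Claim_ definition above) =====
theorem isConvertibleData_spec : Claim_equal_isConvertibleData := by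
  intro dataset _
  unfold Spec_isConvertibleData isConvertibleData isConvertibleData_alt
  rw [PySem.List.foldl_append_singleton_eq_map]
  exact List.map_congr_left (fun s _ => pvJudge_eq s)
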